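-- pv_equiv track=rewrite | github.com/Igg9or/Math | app.py | determine_stage
-- ===== SOURCE A (Python) =====
-- def determine_stage(participant_count):
--     """Определяет начальную стадию турнира по количеству участников"""
--     stages = [
--         (2, '1/2'),
--         (4, '1/4'),
--         (8, '1/8'),
--         (16, '1/16'),
--         (32, '1/32'),
--         (64, '1/64')
--     ]
--
--     # Находим ближайшую нижнюю степень двойки
--     closest_stage = '1/2'  # минимальная стадия
--     for threshold, stage in sorted(stages, reverse=True):
--         if participant_count >= threshold:
--             closest_stage = stage
--             break
--
--     return closest_stage
-- ===== SOURCE B (Python) =====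
-- def determine_stage(participant_count):
--     """Определяет начальную стадию турнира по количеству участников"""
--     if participant_count < 2:
--         return '1/2'
--     power = 1 << (int(participant_count).bit_length() - 1)
--     power = max(2, min(64, power))
--     return f'1/{power}'
-- ===== Notes on version B (the rewrite author's own statement) =====
-- stated objective: simpler
-- what changed: Replaces the sorted-table scan with a closed-form computation: floor power of two via bit_length, clamped into [2,64].
import Mathlib
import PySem

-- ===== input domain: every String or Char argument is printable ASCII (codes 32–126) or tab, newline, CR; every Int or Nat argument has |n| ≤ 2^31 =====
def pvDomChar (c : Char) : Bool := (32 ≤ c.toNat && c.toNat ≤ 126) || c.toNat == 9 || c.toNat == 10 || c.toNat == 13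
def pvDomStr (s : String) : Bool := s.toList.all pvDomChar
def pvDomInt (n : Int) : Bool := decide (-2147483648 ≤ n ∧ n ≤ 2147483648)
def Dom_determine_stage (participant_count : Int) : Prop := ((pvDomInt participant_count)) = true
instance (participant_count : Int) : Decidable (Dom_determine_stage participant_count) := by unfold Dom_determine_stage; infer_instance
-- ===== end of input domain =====

-- B replaces A's sorted-table scan with a closed-form floor-power-of-two (bit_length) clamped into [2,64]; objective: simpler.


-- ===== PORT A =====
-- the for-loop with break: first (threshold, stage) with pc >= threshold wins; '1/2' if none
def pvStagesLoop (pc : Int) : List (Int × String) → String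
  | [] => "1/2"
  | (t, s) :: rest => if pc ≥ t then s else pvStagesLoop pc rest

def determine_stage (participant_count : Int) : String :=
  let stages : List (Int × String) :=
    [(2, "1/2"), (4, "1/4"), (8, "1/8"), (16, "1/16"), (32, "1/32"), (64, "1/64")]
  pvStagesLoop participant_count (PySem.List.sorted2 stages (·.1) (·.2) true)

-- ===== PORT B =====
-- Python's int.bit_length: 0 for 0, Nat.log2 n + 1 for n ≥ 1 (exact on all of Nat)
def pvBitLength (n : Nat) : Nat := if n = 0 then 0 else Nat.log2 n + 1

def determine_stage_alt (participant_count : Int) : String :=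
  if participant_count < 2 then "1/2"
  else
    let power : Int := 2 ^ (pvBitLength participant_count.toNat - 1)  -- 1 << (bit_length - 1)
    let power := max 2 (min 64 power)
    "1/" ++ PySem.Int.toStr power

-- ===== PRECONDITION & SPEC =====
def Spec_determine_stage (participant_count : Int) (out : String) : Prop := out = determine_stage_alt participant_count
instance (participant_count : Int) (out : String) : Decidable (Spec_determine_stage participant_count out) := by unfold Spec_determine_stage; infer_instance

-- ===== CLAIM (what is proved, stated in full; the proofs are below) =====
def Claim_equal_determine_stage : Prop := ∀ (participant_count : Int), Dom_determine_stage participant_count → Spec_determine_stage participant_count (determine_stage participant_count)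

-- ===== LEMMAS AND PROOFS =====
-- the sorted table, evaluated once
theorem pv_sorted_stages :
    PySem.List.sorted2 ([(2, "1/2"), (4, "1/4"), (8, "1/8"), (16, "1/16"), (32, "1/32"), (64, "1/64")] : List (Int × String)) (·.1) (·.2) true
      = [(64, "1/64"), (32, "1/32"), (16, "1/16"), (8, "1/8"), (4, "1/4"), (2, "1/2")] := by decide

theorem pv_big (pc : Int) (h : 64 ≤ pc) :
    determine_stage pc = determine_stage_alt pc := by
  have hA : determine_stage pc = "1/64" := by
    simp only [determine_stage, pv_sorted_stages, pvStagesLoop, if_pos h]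
  have hlog : 6 ≤ Nat.log2 pc.toNat := by
    rw [Nat.le_log2 (by omega)]
    omega
  have hpow : (64 : Int) ≤ 2 ^ (pvBitLength pc.toNat - 1) := by
    have : (2:Int) ^ 6 ≤ 2 ^ (pvBitLength pc.toNat - 1) := by
      apply pow_le_pow_right₀ (by norm_num)
      simp only [pvBitLength]
      rw [if_neg (by omega)]
      omega
    calc (64 : Int) = 2 ^ 6 := by norm_num
      _ ≤ _ := this
  have hB : determine_stage_alt pc = "1/64" := by
    simp only [determine_stage_alt, if_neg (by omega : ¬ pc < 2)]
    have h1 : min 64 (2 ^ (pvBitLength pc.toNat - 1) : Int) = 64 := min_eq_left hpow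
    rw [h1]
    decide
  rw [hA, hB]

theorem pv_small (pc : Int) (h : pc < 2) :
    determine_stage pc = determine_stage_alt pc := by
  have hA : determine_stage pc = "1/2" := by
    simp only [determine_stage, pv_sorted_stages, pvStagesLoop]
    rw [if_neg (by omega), if_neg (by omega), if_neg (by omega),
        if_neg (by omega), if_neg (by omega), if_neg (by omega)]
  rw [hA, determine_stage_alt, if_pos h]

-- ===== VERDICT (by name: the statement is the Claim_ definition above) =====
theorem determine_stage_spec : Claim_equal_determine_stage := by
  intro pc _
  unfold Spec_determine_stage
  by_cases h64 : 64 ≤ pc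
  · exact (pv_big pc h64).symm ▸ rfl
  · by_cases h2 : pc < 2
    · exact (pv_small pc h2).symm ▸ rfl
    · -- 2 ≤ pc < 64: finite check
      interval_cases pc <;> decide
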